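-- pv_equiv track=rewrite | github.com/Tom-Huang/rtx_on_taco | hulc2/datasets/utils/shared_memory_loader_combined_lang_only.py | gather_results
-- ===== SOURCE A (Python) =====
-- from collections import Counter, defaultdict
--
-- def gather_results(return_dict):
--     episode_lookup_vision = defaultdict(list)
--     lang_episode_dict = defaultdict(dict)
--     for proc in sorted(return_dict):
--         for key in return_dict[proc][0]:
--             episode_lookup_vision[key] += return_dict[proc][0][key]
--             lang_episode_dict[key].update(return_dict[proc][1][key])
--     return episode_lookup_vision, lang_episode_dict
-- ===== SOURCE B (Python) =====
-- from collections import defaultdict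
--
-- def gather_results(return_dict):
--     procs = sorted(return_dict)
--     # pass 1: the ordered union of all episode keys (first occurrence over sorted procs)
--     keys = []
--     for p in procs:
--         for k in return_dict[p][0]:
--             if k not in keys:
--                 keys.append(k)
--     # pass 2: per key, gather every carrying proc's contribution in sorted-proc order
--     episode_lookup_vision = defaultdict(list)
--     lang_episode_dict = defaultdict(dict)
--     for k in keys:
--         vis = []
--         lang = {}
--         for p in procs:
--             if k in return_dict[p][0]:
--                 vis += return_dict[p][0][k]
--                 lang.update(return_dict[p][1][k])
--         episode_lookup_vision[k] = vis
--         lang_episode_dict[k] = lang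
--     return episode_lookup_vision, lang_episode_dict
-- ===== Notes on version B (the rewrite author's own statement) =====
-- stated objective: alternative
-- what changed: B inverts the loop nesting into two staged passes: it first builds the ordered union of episode keys over the sorted processes, then for each key scans the sorted processes again, concatenating that key's vision entries and merging its language dicts, instead of A's single pass that merges every process inline into two growing defaultdicts.
-- outside the precondition, e.g. on gather_results({0: ({'a': [1]}, {})}): A raises KeyError, B raises KeyError
import Mathlib
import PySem

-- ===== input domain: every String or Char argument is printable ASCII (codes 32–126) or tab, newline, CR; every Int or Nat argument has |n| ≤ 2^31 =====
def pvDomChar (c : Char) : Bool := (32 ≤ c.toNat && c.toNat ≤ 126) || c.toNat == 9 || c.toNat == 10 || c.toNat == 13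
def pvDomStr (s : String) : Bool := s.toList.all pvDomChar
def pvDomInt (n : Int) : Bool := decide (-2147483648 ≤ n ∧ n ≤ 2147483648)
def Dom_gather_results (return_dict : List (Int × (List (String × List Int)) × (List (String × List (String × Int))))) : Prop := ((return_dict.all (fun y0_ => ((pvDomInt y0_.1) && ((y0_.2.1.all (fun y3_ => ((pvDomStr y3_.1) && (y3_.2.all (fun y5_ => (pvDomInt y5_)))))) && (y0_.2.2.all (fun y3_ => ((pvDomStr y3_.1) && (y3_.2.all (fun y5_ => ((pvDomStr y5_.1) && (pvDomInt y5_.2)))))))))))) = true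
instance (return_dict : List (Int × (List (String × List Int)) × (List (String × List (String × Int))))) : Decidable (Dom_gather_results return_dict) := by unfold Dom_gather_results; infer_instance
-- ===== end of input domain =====

-- B restages A's single merging pass as two passes: first the ordered union of episode keys over the
-- sorted procs, then a per-key scan of the sorted procs gathering that key's contributions
-- (alternative decomposition, same cost). Outputs are dicts rendered as items lists.

-- ===== PORT A =====
def gather_results (return_dict : List (Int × (List (String × List Int)) × (List (String × List (String × Int))))) : (List (String × List Int)) × (List (String × List (String × Int))) :=
  let rdD := PySem.Dict.mk return_dict
  let procs := PySem.List.sorted (return_dict.map Prod.fst) (fun x => x) false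
  let st := procs.foldl (fun st p =>
      let pd := rdD.getD p ([], [])
      (pd.1.map Prod.fst).foldl (fun st k =>
          (st.1.insert k (st.1.getD k [] ++ (PySem.Dict.mk pd.1).getD k []),
           st.2.insert k (((PySem.Dict.mk pd.2).getD k []).foldl
               (fun d kv => d.insert kv.1 kv.2) (st.2.getD k PySem.Dict.empty)))) st)
    ((PySem.Dict.empty : PySem.Dict String (List Int)),
     (PySem.Dict.empty : PySem.Dict String (PySem.Dict String Int)))
  (st.1.items, st.2.items.map (fun e => (e.1, e.2.items)))

-- ===== PORT B =====
-- Pass 2 of Source B writes each key of 'keys' exactly once, in order, into two fresh defaultdicts,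
-- so their items lists ARE 'keys' mapped to the gathered value — the port renders that map directly.
def gather_results_alt (return_dict : List (Int × (List (String × List Int)) × (List (String × List (String × Int))))) : (List (String × List Int)) × (List (String × List (String × Int))) :=
  let procs := PySem.List.sorted (return_dict.map Prod.fst) (fun x => x) false
  let keys := procs.foldl (fun ks p =>
      ((((PySem.Dict.mk return_dict).getD p ([], [])).1.map Prod.fst).foldl
        (fun ks k => if k ∈ ks then ks else ks ++ [k]) ks)) []
  let gather := fun (k : String) =>
      procs.foldl (fun vl p =>
          let pd := (PySem.Dict.mk return_dict).getD p ([], [])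
          if k ∈ pd.1.map Prod.fst then
            (vl.1 ++ (PySem.Dict.mk pd.1).getD k [],
             ((PySem.Dict.mk pd.2).getD k []).foldl (fun d kv => d.insert kv.1 kv.2) vl.2)
          else vl)
        (([] : List Int), (PySem.Dict.empty : PySem.Dict String Int))
  (keys.map (fun k => (k, (gather k).1)), keys.map (fun k => (k, (gather k).2.items)))

-- ===== PRECONDITION & SPEC =====
-- Pre_ excludes (a) inputs where the Python A raises KeyError (an episode key present in a proc's
-- first dict but missing from its second), and (b) association lists whose first dict has duplicate
-- keys — those do not represent any Python dict, so A is not defined on them.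
def Pre_gather_results (return_dict : List (Int × (List (String × List Int)) × (List (String × List (String × Int))))) : Prop :=
  ∀ e ∈ return_dict, (e.2.1.map Prod.fst).Nodup ∧ ∀ k ∈ e.2.1.map Prod.fst, k ∈ e.2.2.map Prod.fst
instance (return_dict : List (Int × (List (String × List Int)) × (List (String × List (String × Int))))) : Decidable (Pre_gather_results return_dict) := by unfold Pre_gather_results; infer_instance

def pvWitness_gather_results : (List (Int × (List (String × List Int)) × (List (String × List (String × Int))))) :=
  [(0, ([("a", [1, 2])], [("a", [("go", 3)])])), (1, ([("a", [5]), ("b", [])], [("a", [("go", 4)]), ("b", [])]))]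

def Spec_gather_results (return_dict : List (Int × (List (String × List Int)) × (List (String × List (String × Int))))) (out : (List (String × List Int)) × (List (String × List (String × Int)))) : Prop := out = gather_results_alt return_dict
instance (return_dict : List (Int × (List (String × List Int)) × (List (String × List (String × Int))))) (out : (List (String × List Int)) × (List (String × List (String × Int)))) : Decidable (Spec_gather_results return_dict out) := by unfold Spec_gather_results; infer_instance

-- ===== CLAIM (what is proved, stated in full; the proofs are below) =====
def Claim_equal_gather_results : Prop := ∀ (return_dict : List (Int × (List (String × List Int)) × (List (String × List (String × Int))))), Dom_gather_results return_dict → Pre_gather_results return_dict → Spec_gather_results return_dict (gather_results return_dict)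

-- ===== LEMMAS AND PROOFS =====

-- proof-only abbreviations for the input type, the per-key value pair and A's loop state
abbrev pvRD : Type := List (Int × (List (String × List Int)) × (List (String × List (String × Int))))
abbrev pvV : Type := List Int × PySem.Dict String Int
abbrev pvS : Type := PySem.Dict String (List Int) × PySem.Dict String (PySem.Dict String Int)

def pvLook (rd : pvRD) (p : Int) : (List (String × List Int)) × (List (String × List (String × Int))) :=
  (PySem.Dict.mk rd).getD p ([], [])
def pvKeys0 (rd : pvRD) (p : Int) : List String := (pvLook rd p).1.map Prod.fst
def pvProcs (rd : pvRD) : List Int := PySem.List.sorted (rd.map Prod.fst) (fun x => x) false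
def pvUpd (rd : pvRD) (p : Int) (k : String) (w : pvV) : pvV :=
  (w.1 ++ (PySem.Dict.mk (pvLook rd p).1).getD k [],
   ((PySem.Dict.mk (pvLook rd p).2).getD k []).foldl (fun d kv => d.insert kv.1 kv.2) w.2)
def pvStep (rd : pvRD) (p : Int) (st : pvS) (k : String) : pvS :=
  (st.1.insert k (pvUpd rd p k (st.1.getD k [], st.2.getD k PySem.Dict.empty)).1,
   st.2.insert k (pvUpd rd p k (st.1.getD k [], st.2.getD k PySem.Dict.empty)).2)
def pvDefault : pvV := ([], PySem.Dict.empty)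
def pvOr (ks : List String) (v : String → pvV) (k : String) : pvV := if k ∈ ks then v k else pvDefault
def pvCanon (ks : List String) (v : String → pvV) : pvS :=
  (PySem.Dict.mk (ks.map fun a => (a, (v a).1)), PySem.Dict.mk (ks.map fun a => (a, (v a).2)))
def pvDedup (ks ls : List String) : List String :=
  ls.foldl (fun acc k => if k ∈ acc then acc else acc ++ [k]) ks
def pvVal (rd : pvRD) (procs : List Int) (w : pvV) (k : String) : pvV :=
  procs.foldl (fun w p => if k ∈ pvKeys0 rd p then pvUpd rd p k w else w) w

theorem pv_mk_getD {β : Type} (ks : List String) (f : String → β) (k : String) (d : β) :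
    (PySem.Dict.mk (ks.map fun a => (a, f a))).getD k d = if k ∈ ks then f k else d := by
  induction ks with
  | nil => simp [PySem.Dict.getD, PySem.Dict.get?]
  | cons a t ih =>
    simp only [List.map_cons]
    rw [PySem.Dict.getD_eq_get?_getD, PySem.Dict.get?_mk_cons]
    by_cases h : a = k
    · subst h; simp
    · rw [show (a == k) = false by simp [h], if_neg (by simp)]
      rw [← PySem.Dict.getD_eq_get?_getD, ih]
      have hka : ¬ k = a := fun hh => h hh.symm
      simp [hka]

theorem pv_mk_insert {β : Type} (ks : List String) (f : String → β) (k : String) (w : β) :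
    (PySem.Dict.mk (ks.map fun a => (a, f a))).insert k w
    = PySem.Dict.mk ((if k ∈ ks then ks else ks ++ [k]).map fun a => (a, if a = k then w else f a)) := by
  have hc : (PySem.Dict.mk (ks.map fun a => (a, f a))).contains k = decide (k ∈ ks) := by
    rw [PySem.Dict.contains_eq_decide_mem_keys]
    simp [PySem.Dict.keys]
  by_cases h : k ∈ ks
  · apply PySem.Dict.ext
    rw [PySem.Dict.items_insert_of_contains _ w (by rw [hc]; simpa)]
    simp only [h, if_pos]
    show (ks.map fun a => (a, f a)).map _ = _
    rw [List.map_map]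
    apply List.map_congr_left
    intro a _
    by_cases hak : a = k
    · subst hak; simp
    · simp [hak]
  · apply PySem.Dict.ext
    rw [PySem.Dict.items_insert_of_not_contains _ w (by rw [hc]; simpa)]
    rw [if_neg h, List.map_append]
    show (ks.map fun a => (a, f a)) ++ _ = _
    congr 1
    · apply List.map_congr_left
      intro a ha
      have hak : a ≠ k := fun hh => h (hh ▸ ha)
      simp [hak]
    · simp

theorem pv_canon_congr (ks : List String) (v w : String → pvV) (h : ∀ a ∈ ks, v a = w a) :
    pvCanon ks v = pvCanon ks w := by
  unfold pvCanon
  refine Prod.ext ?_ ?_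
  · exact congrArg PySem.Dict.mk (List.map_congr_left (fun a ha => by rw [h a ha]))
  · exact congrArg PySem.Dict.mk (List.map_congr_left (fun a ha => by rw [h a ha]))

theorem pv_canon_insert (ks : List String) (v : String → pvV) (k : String) (w : pvV) :
    ((pvCanon ks v).1.insert k w.1, (pvCanon ks v).2.insert k w.2)
    = pvCanon (if k ∈ ks then ks else ks ++ [k]) (fun a => if a = k then w else v a) := by
  have h1 := pv_mk_insert ks (fun a => (v a).1) k w.1
  have h2 := pv_mk_insert ks (fun a => (v a).2) k w.2
  unfold pvCanon
  refine Prod.ext ?_ ?_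
  · show (PySem.Dict.mk (ks.map fun a => (a, (v a).1))).insert k w.1 = _
    rw [h1]
    congr 1
    apply List.map_congr_left
    intro a _
    by_cases hak : a = k <;> simp [hak]
  · show (PySem.Dict.mk (ks.map fun a => (a, (v a).2))).insert k w.2 = _
    rw [h2]
    congr 1
    apply List.map_congr_left
    intro a _
    by_cases hak : a = k <;> simp [hak]

theorem pv_getD_canon1 (ks : List String) (v : String → pvV) (k : String) :
    (pvCanon ks v).1.getD k [] = (pvOr ks v k).1 := by
  unfold pvCanon pvOr
  rw [pv_mk_getD]
  by_cases h : k ∈ ks <;> simp [h, pvDefault]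

theorem pv_getD_canon2 (ks : List String) (v : String → pvV) (k : String) :
    (pvCanon ks v).2.getD k PySem.Dict.empty = (pvOr ks v k).2 := by
  unfold pvCanon pvOr
  rw [pv_mk_getD]
  by_cases h : k ∈ ks <;> simp [h, pvDefault]

theorem pv_mem_dedup (a : String) : ∀ (ls ks : List String), (a ∈ pvDedup ks ls ↔ a ∈ ks ∨ a ∈ ls) := by
  intro ls
  induction ls with
  | nil => intro ks; simp [pvDedup]
  | cons k ls ih =>
    intro ks
    show a ∈ pvDedup (if k ∈ ks then ks else ks ++ [k]) ls ↔ _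
    rw [ih]
    by_cases h : k ∈ ks
    · simp only [h, if_pos, List.mem_cons]
      constructor
      · rintro (ha | ha)
        · exact Or.inl ha
        · exact Or.inr (Or.inr ha)
      · rintro (ha | ha | ha)
        · exact Or.inl ha
        · exact Or.inl (ha ▸ h)
        · exact Or.inr ha
    · simp only [h, if_neg, not_false_iff, List.mem_append, List.mem_cons]
      tauto

theorem pv_inner (rd : pvRD) (p : Int) :
    ∀ (ls ks : List String) (v : String → pvV), ls.Nodup →
    List.foldl (pvStep rd p) (pvCanon ks v) ls
    = pvCanon (pvDedup ks ls) (fun a => if a ∈ ls then pvUpd rd p a (pvOr ks v a) else v a) := by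
  intro ls
  induction ls with
  | nil =>
    intro ks v _
    simp only [List.foldl_nil]
    exact pv_canon_congr _ _ _ (fun a _ => by simp)
  | cons k ls ih =>
    intro ks v hnd
    obtain ⟨hk, hls⟩ := List.nodup_cons.mp hnd
    rw [List.foldl_cons]
    have hstep : pvStep rd p (pvCanon ks v) k
        = pvCanon (if k ∈ ks then ks else ks ++ [k])
            (fun a => if a = k then pvUpd rd p k (pvOr ks v k) else v a) := by
      unfold pvStep
      rw [pv_getD_canon1, pv_getD_canon2]
      have harg : ((pvOr ks v k).1, (pvOr ks v k).2) = pvOr ks v k := rfl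
      rw [harg]
      exact pv_canon_insert ks v k (pvUpd rd p k (pvOr ks v k))
    rw [hstep, ih _ _ hls]
    have hkeys : pvDedup (if k ∈ ks then ks else ks ++ [k]) ls = pvDedup ks (k :: ls) := rfl
    rw [hkeys]
    apply congrArg
    funext a
    by_cases hak : a = k
    · subst hak
      simp [hk, pvOr]
    · have hmem : (a ∈ (if k ∈ ks then ks else ks ++ [k])) ↔ a ∈ ks := by
        by_cases h : k ∈ ks <;> simp [h, hak]
      have hor : pvOr (if k ∈ ks then ks else ks ++ [k])
          (fun a => if a = k then pvUpd rd p k (pvOr ks v k) else v a) a = pvOr ks v a := by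
        unfold pvOr
        rw [if_congr hmem rfl rfl]
        by_cases h : a ∈ ks <;> simp [h, hak]
      rw [hor]
      simp [hak]

theorem pv_outer (rd : pvRD) (hnd : ∀ p, (pvKeys0 rd p).Nodup) :
    ∀ (procs : List Int) (ks : List String) (v : String → pvV),
    List.foldl (fun st p => List.foldl (pvStep rd p) st (pvKeys0 rd p)) (pvCanon ks v) procs
    = pvCanon (procs.foldl (fun acc p => pvDedup acc (pvKeys0 rd p)) ks)
        (fun a => pvVal rd procs (pvOr ks v a) a) := by
  intro procs
  induction procs with
  | nil =>
    intro ks v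
    simp only [List.foldl_nil]
    exact pv_canon_congr _ _ _ (fun a ha => by simp [pvVal, pvOr, ha])
  | cons p procs ih =>
    intro ks v
    rw [List.foldl_cons, pv_inner rd p _ ks v (hnd p), ih]
    simp only [List.foldl_cons]
    apply congrArg
    funext a
    have hstepval : pvVal rd (p :: procs) (pvOr ks v a) a
        = pvVal rd procs (if a ∈ pvKeys0 rd p then pvUpd rd p a (pvOr ks v a) else pvOr ks v a) a := rfl
    rw [hstepval]
    congr 1
    unfold pvOr
    by_cases h : a ∈ pvKeys0 rd p
    · have : a ∈ pvDedup ks (pvKeys0 rd p) := (pv_mem_dedup a _ ks).mpr (Or.inr h)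
      simp [this, h]
    · have : a ∈ pvDedup ks (pvKeys0 rd p) ↔ a ∈ ks := by
        rw [pv_mem_dedup]
        simp [h]
      rw [if_congr this rfl rfl]
      by_cases hks : a ∈ ks <;> simp [hks, h]

theorem pv_getD_mem_or {β : Type} (l : List (Int × β)) (p : Int) (d : β) :
    (PySem.Dict.mk l).getD p d = d ∨ (p, (PySem.Dict.mk l).getD p d) ∈ l := by
  induction l with
  | nil => left; simp [PySem.Dict.getD, PySem.Dict.get?]
  | cons e t ih =>
    rw [PySem.Dict.getD_eq_get?_getD, PySem.Dict.get?_mk_cons]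
    by_cases h : e.1 = p
    · right
      subst h
      simp
    · rw [show (e.1 == p) = false by simp [h], if_neg (by simp), ← PySem.Dict.getD_eq_get?_getD]
      rcases ih with h1 | h1
      · left; exact h1
      · right; exact List.mem_cons_of_mem _ h1

theorem pv_keys0_nodup (rd : pvRD) (hpre : Pre_gather_results rd) (p : Int) : (pvKeys0 rd p).Nodup := by
  unfold pvKeys0 pvLook
  rcases pv_getD_mem_or rd p ([], []) with h | h
  · rw [h]; simp
  · exact ((hpre _ h).1)

theorem pv_main : ∀ rd, Pre_gather_results rd → gather_results rd = gather_results_alt rd := by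
  intro rd hpre
  have hnd := pv_keys0_nodup rd hpre
  show (fun S : pvS => (S.1.items, S.2.items.map (fun e => (e.1, e.2.items))))
      (List.foldl (fun st p => List.foldl (pvStep rd p) st (pvKeys0 rd p))
        (pvCanon [] (fun _ => pvDefault)) (pvProcs rd)) = _
  rw [pv_outer rd hnd (pvProcs rd) [] (fun _ => pvDefault)]
  show ((pvCanon _ _).1.items, (pvCanon _ _).2.items.map (fun e => (e.1, e.2.items))) = _
  have hor : ∀ a, pvOr [] (fun _ => pvDefault) a = pvDefault := by intro a; simp [pvOr]
  unfold pvCanon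
  show (List.map _ _, (List.map _ _).map _) = _
  rw [List.map_map]
  show _ = ((List.foldl _ [] (pvProcs rd)).map _, (List.foldl _ [] (pvProcs rd)).map _)
  have hkeys : (pvProcs rd).foldl
      (fun ks p => List.foldl (fun ks k => if k ∈ ks then ks else ks ++ [k]) ks (pvKeys0 rd p)) []
      = (pvProcs rd).foldl (fun acc p => pvDedup acc (pvKeys0 rd p)) [] := rfl
  refine Prod.ext ?_ ?_
  · rw [← hkeys]
    apply List.map_congr_left
    intro a _
    simp only [hor]
    rfl
  · rw [← hkeys]
    apply List.map_congr_left
    intro a _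
    simp only [hor]
    rfl

-- ===== VERDICT (by name: the statement is the Claim_ definition above) =====
theorem gather_results_spec : Claim_equal_gather_results := by
  intro rd _ hpre
  unfold Spec_gather_results
  exact pv_main rd hpre
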